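-- pv_equiv track=rewrite | github.com/gepirvu/iris.ai | src/patent_rag_app/retrieval/service.py | _match_front_field
-- ===== SOURCE A (Python) =====
-- from typing import Dict, Iterable, List, Tuple
--
-- FIELD_PRIORITIES = {
--     "45": 0,
--     "43": 1,
-- }
--
-- FIELD_SYNONYMS = {
--     "11": ["publication number", "patent number", "pub number"],
--     "12": ["document kind"],
--     "21": ["application number"],
--     "22": ["filing date", "date of filing"],
--     "30": ["priority", "priority data"],
--     "43": [
--         "publication date",
--         "date of publication",
--         "date publication",
--         "publication date of application",
--         "date of publication of application",
--         "application publication date",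
--         "publication of the application",
--         "(43)",
--     ],
--     "45": [
--         "grant publication",
--         "grant date",
--         "date of grant",
--         "publication of the grant",
--         "publication and mention of the grant",
--         "date of publication and mention of the grant",
--         "grant of the patent",
--         "(45)",
--     ],
--     "51": ["classification", "ipc"],
--     "54": ["title"],
--     "56": ["citation", "references"],
--     "57": ["abstract"],
--     "71": ["applicant"],
--     "72": ["inventor"],
--     "73": ["assignee", "owner"],
--     "74": ["representative", "agent"],
--     "84": ["designated states", "states"],
--     "86": ["international application"],
--     "87": ["international publication"],
-- }
--
-- def _match_front_field(text: str) -> str | None: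
--     matches: list[Tuple[str, str]] = []
--     for code, synonyms in FIELD_SYNONYMS.items():
--         for synonym in synonyms:
--             if synonym in text:
--                 matches.append((code, synonym))
--                 break
--     if not matches:
--         return None
--     if len(matches) == 1:
--         return matches[0][0]
--     matches.sort(key=lambda item: (FIELD_PRIORITIES.get(item[0], 100), -len(item[1])))
--     return matches[0][0]
-- ===== SOURCE B (Python) =====
-- FIELD_PRIORITIES = {
--     "45": 0,
--     "43": 1,
-- }
--
-- FIELD_SYNONYMS = {
--     "11": ["publication number", "patent number", "pub number"],
--     "12": ["document kind"],
--     "21": ["application number"],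
--     "22": ["filing date", "date of filing"],
--     "30": ["priority", "priority data"],
--     "43": [
--         "publication date",
--         "date of publication",
--         "date publication",
--         "publication date of application",
--         "date of publication of application",
--         "application publication date",
--         "publication of the application",
--         "(43)",
--     ],
--     "45": [
--         "grant publication",
--         "grant date",
--         "date of grant",
--         "publication of the grant",
--         "publication and mention of the grant",
--         "date of publication and mention of the grant",
--         "grant of the patent",
--         "(45)",
--     ],
--     "51": ["classification", "ipc"],
--     "54": ["title"],
--     "56": ["citation", "references"],
--     "57": ["abstract"],
--     "71": ["applicant"],
--     "72": ["inventor"],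
--     "73": ["assignee", "owner"],
--     "74": ["representative", "agent"],
--     "84": ["designated states", "states"],
--     "86": ["international application"],
--     "87": ["international publication"],
-- }
--
--
-- def _match_front_field(text: str) -> str | None:
--     # single argmin pass: no matches list, no length special case, no sort
--     best_key = None
--     best_code = None
--     for code, synonyms in FIELD_SYNONYMS.items():
--         for synonym in synonyms:
--             if synonym in text:
--                 key = (FIELD_PRIORITIES.get(code, 100), -len(synonym))
--                 if best_key is None or key < best_key:
--                     best_key = key
--                     best_code = code
--                 break
--     return best_code
-- ===== Notes on version B (the rewrite author's own statement) =====
-- stated objective: simpler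
-- what changed: Replaces collect-matches-then-stable-sort (plus an empty and a length-1 special case) with a single argmin pass that keeps the running best (priority, -len) key, updating only on strictly smaller key so dict-order ties resolve exactly like the stable sort.
import Mathlib
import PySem

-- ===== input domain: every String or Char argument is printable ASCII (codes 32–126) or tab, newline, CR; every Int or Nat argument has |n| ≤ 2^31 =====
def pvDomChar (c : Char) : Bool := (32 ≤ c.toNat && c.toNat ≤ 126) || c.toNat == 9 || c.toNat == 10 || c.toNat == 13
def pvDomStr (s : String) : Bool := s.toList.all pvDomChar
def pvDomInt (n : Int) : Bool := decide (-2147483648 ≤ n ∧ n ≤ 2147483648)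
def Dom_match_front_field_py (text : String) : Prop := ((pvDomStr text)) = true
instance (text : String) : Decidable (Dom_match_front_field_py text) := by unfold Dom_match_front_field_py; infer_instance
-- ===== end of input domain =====

-- B replaces A's collect-then-stable-sort (with empty/length-1 special cases) by a single
-- strict-argmin pass over the synonym table; proved to return the same Option String.


-- module-level constants shared by both Pythons
def fieldPriorities : PySem.Dict String Int :=
  PySem.Dict.ofList [("45", 0), ("43", 1)]

def fieldSynonyms : List (String × List String) :=
  [ ("11", ["publication number", "patent number", "pub number"]),
    ("12", ["document kind"]),
    ("21", ["application number"]),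
    ("22", ["filing date", "date of filing"]),
    ("30", ["priority", "priority data"]),
    ("43", ["publication date", "date of publication", "date publication",
            "publication date of application", "date of publication of application",
            "application publication date", "publication of the application", "(43)"]),
    ("45", ["grant publication", "grant date", "date of grant",
            "publication of the grant", "publication and mention of the grant",
            "date of publication and mention of the grant", "grant of the patent", "(45)"]),
    ("51", ["classification", "ipc"]),
    ("54", ["title"]),
    ("56", ["citation", "references"]),
    ("57", ["abstract"]),
    ("71", ["applicant"]),
    ("72", ["inventor"]),
    ("73", ["assignee", "owner"]),
    ("74", ["representative", "agent"]),
    ("84", ["designated states", "states"]),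
    ("86", ["international application"]),
    ("87", ["international publication"]) ]

-- ===== PORT A =====
-- the sort key lambda of A: (FIELD_PRIORITIES.get(code, 100), -len(synonym))
def matchKey1 (p : String × String) : Int := PySem.Dict.getD fieldPriorities p.1 100
def matchKey2 (p : String × String) : Int := -(PySem.Str.len p.2)

def match_front_field_py (text : String) : Option String :=
  let matchesL : List (String × String) :=
    fieldSynonyms.foldl (fun acc cs =>
      match cs.2.find? (fun syn => PySem.Str.isIn syn text) with   -- inner for/break
      | some syn => acc ++ [(cs.1, syn)]
      | none => acc) []
  match matchesL with
  | [] => none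
  | [m] => some m.1
  | _ =>
    match PySem.List.sorted2 matchesL matchKey1 matchKey2 with
    | m :: _ => some m.1
    | [] => none

-- ===== PORT B =====
def match_front_field_py_alt (text : String) : Option String :=
  (fieldSynonyms.foldl (fun best cs =>
      match cs.2.find? (fun syn => PySem.Str.isIn syn text) with   -- inner for/break
      | some syn =>
        let k : Int × Int := (PySem.Dict.getD fieldPriorities cs.1 100, -(PySem.Str.len syn))
        match best with
        | none => some (k, cs.1)
        | some (bk, bc) =>
          if k.1 < bk.1 ∨ (k.1 = bk.1 ∧ k.2 < bk.2) then some (k, cs.1) else some (bk, bc)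
      | none => best)
    (none : Option ((Int × Int) × String))).map (·.2)

-- ===== PRECONDITION & SPEC =====
def Spec_match_front_field_py (text : String) (out : Option String) : Prop := out = match_front_field_py_alt text
instance (text : String) (out : Option String) : Decidable (Spec_match_front_field_py text out) := by unfold Spec_match_front_field_py; infer_instance

-- ===== CLAIM (what is proved, stated in full; the proofs are below) =====
def Claim_equal_match_front_field_py : Prop := ∀ (text : String), Dom_match_front_field_py text → Spec_match_front_field_py text (match_front_field_py text)

-- ===== LEMMAS AND PROOFS =====

-- first-minimum step: running best under a strict "before" test (keeps the earlier element on ties)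
def fmStep {α : Type} (bef : α → α → Bool) (b : Option α) (x : α) : Option α :=
  match b with
  | none => some x
  | some m => if bef x m then some x else some m

theorem head_insertBy {α : Type} (bef : α → α → Bool) (x : α) (ys : List α) :
    (PySem.List.insertBy bef x ys).head? = some (match ys with | [] => x | h :: _ => if bef x h then x else h) := by
  cases ys with
  | nil => rfl
  | cons h t =>
    show (if bef x h then x :: h :: t else h :: PySem.List.insertBy bef x t).head? = _
    split <;> simp_all

theorem head_foldl_insertBy {α : Type} (bef : α → α → Bool) :
    ∀ (ms : List α) (acc : List α),
      (ms.foldl (fun a x => PySem.List.insertBy bef x a) acc).head? = ms.foldl (fmStep bef) acc.head? := by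
  intro ms
  induction ms with
  | nil => intro acc; rfl
  | cons x t ih =>
    intro acc
    have h1 : (PySem.List.insertBy bef x acc).head? = fmStep bef acc.head? x := by
      cases acc with
      | nil => rfl
      | cons h t' => rw [head_insertBy]; cases hb : bef x h <;> simp [fmStep, hb]
    simp only [List.foldl_cons, ih, h1]

-- A's match list, element-wise
def mDelta (text : String) (cs : String × List String) : List (String × String) :=
  match cs.2.find? (fun syn => PySem.Str.isIn syn text) with
  | some syn => [(cs.1, syn)]
  | none => []

theorem matches_eq_flatMap (text : String) (acc : List (String × String)) (its : List (String × List String)) :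
    its.foldl (fun acc cs =>
      match cs.2.find? (fun syn => PySem.Str.isIn syn text) with
      | some syn => acc ++ [(cs.1, syn)]
      | none => acc) acc = acc ++ its.flatMap (mDelta text) := by
  induction its generalizing acc with
  | nil => simp
  | cons c t ih =>
    simp only [List.foldl_cons, List.flatMap_cons, mDelta]
    cases c.2.find? (fun syn => PySem.Str.isIn syn text) <;>
      simp only [ih, List.nil_append, List.append_assoc, List.cons_append]

-- the comparator sorted2 uses for A's key pair
def aBef (a b : String × String) : Bool :=
  decide (matchKey1 a < matchKey1 b) || (!decide (matchKey1 b < matchKey1 a) && decide (matchKey2 a < matchKey2 b))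

-- B's step, on an already-extracted match
def bStep (b : Option ((Int × Int) × String)) (e : String × String) : Option ((Int × Int) × String) :=
  match b with
  | none => some ((PySem.Dict.getD fieldPriorities e.1 100, -(PySem.Str.len e.2)), e.1)
  | some (bk, bc) =>
    if PySem.Dict.getD fieldPriorities e.1 100 < bk.1
        ∨ (PySem.Dict.getD fieldPriorities e.1 100 = bk.1 ∧ -(PySem.Str.len e.2) < bk.2) then
      some ((PySem.Dict.getD fieldPriorities e.1 100, -(PySem.Str.len e.2)), e.1)
    else some (bk, bc)

theorem b_foldl_eq_flatMap (text : String) (its : List (String × List String)) :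
    ∀ (b : Option ((Int × Int) × String)),
      its.foldl (fun best cs =>
        match cs.2.find? (fun syn => PySem.Str.isIn syn text) with
        | some syn =>
          let k : Int × Int := (PySem.Dict.getD fieldPriorities cs.1 100, -(PySem.Str.len syn))
          match best with
          | none => some (k, cs.1)
          | some (bk, bc) =>
            if k.1 < bk.1 ∨ (k.1 = bk.1 ∧ k.2 < bk.2) then some (k, cs.1) else some (bk, bc)
        | none => best) b
      = (its.flatMap (mDelta text)).foldl bStep b := by
  induction its with
  | nil => intro b; rfl
  | cons c t ih =>
    intro b
    simp only [List.foldl_cons, List.flatMap_cons, List.foldl_append, mDelta]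
    cases c.2.find? (fun syn => PySem.Str.isIn syn text) with
    | none => simp only [List.foldl_nil]; exact ih b
    | some syn => simp only [List.foldl_cons, List.foldl_nil]; exact ih _

def keyTag (e : String × String) : (Int × Int) × String := ((matchKey1 e, matchKey2 e), e.1)

theorem bStep_eq_fmStep (ms : List (String × String)) :
    ∀ (o : Option (String × String)),
      ms.foldl bStep (o.map keyTag) = (ms.foldl (fmStep aBef) o).map keyTag := by
  induction ms with
  | nil => intro o; rfl
  | cons e t ih =>
    intro o
    have h : bStep (o.map keyTag) e = (fmStep aBef o e).map keyTag := by
      cases o with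
      | none => rfl
      | some m =>
        have hc : (PySem.Dict.getD fieldPriorities e.1 100 < matchKey1 m
              ∨ (PySem.Dict.getD fieldPriorities e.1 100 = matchKey1 m
                  ∧ -(PySem.Str.len e.2) < matchKey2 m))
            ↔ aBef e m = true := by
          simp only [aBef, matchKey1, matchKey2, Bool.or_eq_true, Bool.and_eq_true,
            Bool.not_eq_true', decide_eq_true_eq, decide_eq_false_iff_not]
          omega
        simp only [Option.map_some, keyTag, bStep, fmStep]
        split_ifs with h1 h2 h2
        · rfl
        · exact absurd (hc.mp h1) h2
        · exact absurd (hc.mpr h2) h1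
        · rfl
    simp only [List.foldl_cons, h, ih]

theorem sorted2_head (ms : List (String × String)) :
    (PySem.List.sorted2 ms matchKey1 matchKey2).head? = ms.foldl (fmStep aBef) none := by
  show (ms.foldl (fun a x => PySem.List.insertBy _ x a) []).head? = _
  rw [head_foldl_insertBy]
  rfl

-- the value A computes, as a function of the match list
def aResult (ms : List (String × String)) : Option String :=
  match ms with
  | [] => none
  | [m] => some m.1
  | _ =>
    match PySem.List.sorted2 ms matchKey1 matchKey2 with
    | m :: _ => some m.1
    | [] => none

theorem foldl_fmStep_some (t : List (String × String)) :
    ∀ (x : String × String), ∃ y, t.foldl (fmStep aBef) (some x) = some y := by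
  induction t with
  | nil => intro x; exact ⟨x, rfl⟩
  | cons a l ih =>
    intro x
    simp only [List.foldl_cons, fmStep]
    cases aBef a x <;> simp only [if_true, Bool.false_eq_true, if_false] <;> apply ih

theorem aResult_eq (ms : List (String × String)) :
    aResult ms = (ms.foldl (fmStep aBef) none).map (·.1) := by
  match ms with
  | [] => rfl
  | [m] => rfl
  | m :: m2 :: t2 =>
    have hh := sorted2_head (m :: m2 :: t2)
    obtain ⟨y, hy⟩ : ∃ y, (m :: m2 :: t2).foldl (fmStep aBef) none = some y := by
      simpa only [List.foldl_cons, fmStep] using foldl_fmStep_some (m2 :: t2) m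
    rw [hy] at hh ⊢
    show (match PySem.List.sorted2 (m :: m2 :: t2) matchKey1 matchKey2 with
          | s :: _ => some s.1
          | [] => none) = (some y).map (·.1)
    cases hs : PySem.List.sorted2 (m :: m2 :: t2) matchKey1 matchKey2 with
    | nil => rw [hs] at hh; simp at hh
    | cons s st =>
      rw [hs] at hh
      simp only [List.head?_cons, Option.some_inj] at hh
      rw [hh]
      rfl

theorem ports_agree (text : String) :
    match_front_field_py text = match_front_field_py_alt text := by
  have h0 : (fieldSynonyms.foldl (fun acc cs =>
      match cs.2.find? (fun syn => PySem.Str.isIn syn text) with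
      | some syn => acc ++ [(cs.1, syn)]
      | none => acc) []) = fieldSynonyms.flatMap (mDelta text) := by
    simpa using matches_eq_flatMap text [] fieldSynonyms
  have hA : match_front_field_py text = aResult (fieldSynonyms.flatMap (mDelta text)) := by
    rw [show match_front_field_py text = aResult (fieldSynonyms.foldl (fun acc cs =>
      match cs.2.find? (fun syn => PySem.Str.isIn syn text) with
      | some syn => acc ++ [(cs.1, syn)]
      | none => acc) []) from rfl, h0]
  have hB : match_front_field_py_alt text
      = ((fieldSynonyms.flatMap (mDelta text)).foldl bStep none).map (·.2) := by
    exact congrArg (fun o => o.map (·.2)) (b_foldl_eq_flatMap text fieldSynonyms none)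
  rw [hA, hB, aResult_eq,
    show (none : Option ((Int × Int) × String)) = Option.map keyTag none from rfl,
    bStep_eq_fmStep]
  cases (fieldSynonyms.flatMap (mDelta text)).foldl (fmStep aBef) none <;> rfl

-- ===== VERDICT (by name: the statement is the Claim_ definition above) =====
theorem match_front_field_py_spec : Claim_equal_match_front_field_py := by
  intro text _
  unfold Spec_match_front_field_py
  exact ports_agree text
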